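-- pv_equiv track=rewrite | github.com/tellaryt2/micran_project_1 | Tasks/call_func_task_2.py | find_true_value
-- ===== SOURCE A (Python) =====
-- def func(a, b, c, true_a=None, true_b=None, true_c=None):
--     if true_a is not None:
--         return a == true_a
--     elif true_b is not None:
--         return b == true_b
--     elif true_c is not None:
--         return c == true_c
--     else:
--         return False
--
-- def find_true_value(true_a=None, true_b=None, true_c=None):
--     iteration_count = 0
--     true_value = None
--     found = False
--
--     for a in range(1, 11):
--         if found:
--             break
--         for b in range(1, 13):
--             if found:
--                 break
--             for c in range(1, 6):
--                 iteration_count += 1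
--                 if func(a, b, c, true_a, true_b, true_c):
--                     true_value = (a, b, c)
--                     found = True
--                     break
--
--     return iteration_count, true_value
-- ===== SOURCE B (Python) =====
-- def find_true_value(true_a=None, true_b=None, true_c=None):
--     # pick the active axis by the same priority func() uses, then one linear scan
--     for target, limit, weight, pos in ((true_a, 10, 60, 0), (true_b, 12, 5, 1), (true_c, 5, 1, 2)):
--         if target is not None:
--             for i in range(1, limit + 1):
--                 if i == target:
--                     value = [1, 1, 1]
--                     value[pos] = i
--                     return (i - 1) * weight + 1, tuple(value)
--             return 600, None
--     return 600, None
-- ===== Notes on version B (the rewrite author's own statement) =====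
-- stated objective: faster
-- what changed: Replaces the 600-cell nested brute-force grid with a single linear scan over the one axis selected by the same priority (a, then b, then c), computing the iteration count arithmetically as (i-1)*weight+1.
import Mathlib
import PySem

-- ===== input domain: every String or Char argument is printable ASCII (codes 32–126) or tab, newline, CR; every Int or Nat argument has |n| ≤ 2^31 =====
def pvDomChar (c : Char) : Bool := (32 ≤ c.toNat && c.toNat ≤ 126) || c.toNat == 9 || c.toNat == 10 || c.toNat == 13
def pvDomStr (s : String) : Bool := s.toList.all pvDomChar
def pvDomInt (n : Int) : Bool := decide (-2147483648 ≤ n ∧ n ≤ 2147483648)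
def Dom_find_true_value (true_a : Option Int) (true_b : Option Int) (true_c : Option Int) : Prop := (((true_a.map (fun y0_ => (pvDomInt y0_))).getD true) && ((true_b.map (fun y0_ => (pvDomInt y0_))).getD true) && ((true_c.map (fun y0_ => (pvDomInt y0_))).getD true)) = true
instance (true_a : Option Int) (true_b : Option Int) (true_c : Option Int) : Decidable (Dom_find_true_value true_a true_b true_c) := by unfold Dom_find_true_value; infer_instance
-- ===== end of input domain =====

-- B replaces A's 600-cell nested grid with one linear scan over the axis selected
-- by the same priority, computing the iteration count arithmetically (at most 12 comparisons instead of up to 600 grid cells).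

-- ===== PORT A =====
-- port of func(a, b, c, true_a, true_b, true_c)
def pvFunc (a b c : Int) (true_a true_b true_c : Option Int) : Bool :=
  match true_a with
  | some x => a == x
  | none =>
    match true_b with
    | some x => b == x
    | none =>
      match true_c with
      | some x => c == x
      | none => false

-- innermost 'for c' loop: count += 1; on a hit set true_value and break (early return)
def pvLoopC (a b : Int) (ta tb tc : Option Int) (cs : List Int) (cnt : Int) :
    Int × Option (Int × Int × Int) × Bool :=
  match cs with
  | [] => (cnt, none, false)
  | c :: rest =>
    if pvFunc a b c ta tb tc then (cnt + 1, some (a, b, c), true)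
    else pvLoopC a b ta tb tc rest (cnt + 1)

-- middle 'for b' loop: break when found
def pvLoopB (a : Int) (ta tb tc : Option Int) (bs : List Int) (cnt : Int) :
    Int × Option (Int × Int × Int) × Bool :=
  match bs with
  | [] => (cnt, none, false)
  | b :: rest =>
    let r := pvLoopC a b ta tb tc (PySem.List.pyRange 1 6 1) cnt
    if r.2.2 then r else pvLoopB a ta tb tc rest r.1

-- outer 'for a' loop: break when found
def pvLoopA (ta tb tc : Option Int) (as_ : List Int) (cnt : Int) :
    Int × Option (Int × Int × Int) × Bool :=
  match as_ with
  | [] => (cnt, none, false)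
  | a :: rest =>
    let r := pvLoopB a ta tb tc (PySem.List.pyRange 1 13 1) cnt
    if r.2.2 then r else pvLoopA ta tb tc rest r.1

def find_true_value (true_a : Option Int) (true_b : Option Int) (true_c : Option Int) : Int × (Option (Int × Int × Int)) :=
  let r := pvLoopA true_a true_b true_c (PySem.List.pyRange 1 11 1) 0
  (r.1, r.2.1)

-- ===== PORT B =====
-- one linear scan over the selected axis; (600, none) on no hit
def pvScan (target : Int) (weight : Int) (mk : Int → Int × Int × Int) (xs : List Int) :
    Int × Option (Int × Int × Int) :=
  match xs with
  | [] => (600, none)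
  | i :: rest =>
    if i == target then ((i - 1) * weight + 1, some (mk i))
    else pvScan target weight mk rest

def find_true_value_alt (true_a : Option Int) (true_b : Option Int) (true_c : Option Int) : Int × (Option (Int × Int × Int)) :=
  match true_a with
  | some x => pvScan x 60 (fun i => (i, 1, 1)) (PySem.List.pyRange 1 11 1)
  | none =>
    match true_b with
    | some x => pvScan x 5 (fun i => (1, i, 1)) (PySem.List.pyRange 1 13 1)
    | none =>
      match true_c with
      | some x => pvScan x 1 (fun i => (1, 1, i)) (PySem.List.pyRange 1 6 1)
      | none => (600, none)

-- ===== PRECONDITION & SPEC =====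
def Spec_find_true_value (true_a : Option Int) (true_b : Option Int) (true_c : Option Int) (out : Int × (Option (Int × Int × Int))) : Prop := out = find_true_value_alt true_a true_b true_c
instance (true_a : Option Int) (true_b : Option Int) (true_c : Option Int) (out : Int × (Option (Int × Int × Int))) : Decidable (Spec_find_true_value true_a true_b true_c out) := by unfold Spec_find_true_value; infer_instance

-- ===== CLAIM (what is proved, stated in full; the proofs are below) =====
def Claim_equal_find_true_value : Prop := ∀ (true_a : Option Int) (true_b : Option Int) (true_c : Option Int), Dom_find_true_value true_a true_b true_c → Spec_find_true_value true_a true_b true_c (find_true_value true_a true_b true_c)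

-- ===== LEMMAS AND PROOFS =====

-- no match on both sides when the scanned value never equals the target
theorem pvScan_nomatch (x w : Int) (mk : Int → Int × Int × Int) (xs : List Int)
    (h : ∀ i ∈ xs, (i == x) = false) : pvScan x w mk xs = (600, none) := by
  induction xs with
  | nil => rfl
  | cons i rest ih =>
    simp only [pvScan, h i (by simp)]
    exact ih (fun j hj => h j (by simp [hj]))

-- A-side: if the active predicate is false throughout the c-range, the inner loop just counts
theorem pvLoopC_false (a b : Int) (ta tb tc : Option Int) (cs : List Int) (cnt : Int)
    (h : ∀ c ∈ cs, pvFunc a b c ta tb tc = false) :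
    pvLoopC a b ta tb tc cs cnt = (cnt + cs.length, none, false) := by
  induction cs generalizing cnt with
  | nil => simp [pvLoopC]
  | cons c rest ih =>
    simp only [pvLoopC, h c (by simp)]
    rw [ih (cnt + 1) (fun j hj => h j (by simp [hj]))]
    simp; omega

theorem pvLoopB_false (a : Int) (ta tb tc : Option Int) (bs : List Int) (cnt : Int)
    (h : ∀ b ∈ bs, ∀ c ∈ PySem.List.pyRange 1 6 1, pvFunc a b c ta tb tc = false) :
    pvLoopB a ta tb tc bs cnt = (cnt + 5 * bs.length, none, false) := by
  induction bs generalizing cnt with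
  | nil => simp [pvLoopB]
  | cons b rest ih =>
    simp only [pvLoopB]
    rw [pvLoopC_false a b ta tb tc _ cnt (h b (by simp))]
    have hlen : (PySem.List.pyRange 1 6 1).length = 5 := by decide
    rw [hlen]
    simp only [Bool.false_eq_true, if_false]
    show pvLoopB a ta tb tc rest (cnt + 5) = _
    rw [ih (cnt + 5) (fun j hj => h j (by simp [hj]))]
    simp; omega

theorem pvLoopA_false (ta tb tc : Option Int) (as_ : List Int) (cnt : Int)
    (h : ∀ a ∈ as_, ∀ b ∈ PySem.List.pyRange 1 13 1, ∀ c ∈ PySem.List.pyRange 1 6 1,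
          pvFunc a b c ta tb tc = false) :
    pvLoopA ta tb tc as_ cnt = (cnt + 60 * as_.length, none, false) := by
  induction as_ generalizing cnt with
  | nil => simp [pvLoopA]
  | cons a rest ih =>
    simp only [pvLoopA]
    rw [pvLoopB_false a ta tb tc _ cnt (h a (by simp))]
    have hlen : (PySem.List.pyRange 1 13 1).length = 12 := by decide
    rw [hlen]
    simp only [Bool.false_eq_true, if_false]
    show pvLoopA ta tb tc rest (cnt + 5 * 12) = _
    rw [ih (cnt + 5 * 12) (fun j hj => h j (by simp [hj]))]
    simp; omega

-- ===== VERDICT (by name: the statement is the Claim_ definition above) =====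
set_option maxRecDepth 8000 in
theorem find_true_value_spec : Claim_equal_find_true_value := by
  intro ta tb tc _
  unfold Spec_find_true_value
  match ta with
  | some x =>
    by_cases hx : 1 ≤ x ∧ x ≤ 10
    · obtain ⟨h1, h2⟩ := hx
      interval_cases x <;> rfl
    · have hne : ∀ i ∈ PySem.List.pyRange 1 11 1, (i == x) = false := by
        intro i hi
        rw [PySem.List.mem_pyRange_one] at hi
        simp only [beq_eq_false_iff_ne, ne_eq]
        omega
      have hA : find_true_value (some x) tb tc = (600, none) := by
        unfold find_true_value
        rw [pvLoopA_false (some x) tb tc _ 0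
          (fun a ha b _ c _ => by simpa [pvFunc] using hne a ha)]
        decide
      have hB : find_true_value_alt (some x) tb tc = (600, none) := by
        show pvScan x 60 (fun i => (i, 1, 1)) (PySem.List.pyRange 1 11 1) = (600, none)
        exact pvScan_nomatch x 60 _ _ hne
      rw [hA, hB]
  | none =>
    match tb with
    | some x =>
      by_cases hx : 1 ≤ x ∧ x ≤ 12
      · obtain ⟨h1, h2⟩ := hx
        interval_cases x <;> rfl
      · have hne : ∀ i ∈ PySem.List.pyRange 1 13 1, (i == x) = false := by
          intro i hi
          rw [PySem.List.mem_pyRange_one] at hi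
          simp only [beq_eq_false_iff_ne, ne_eq]
          omega
        have hA : find_true_value none (some x) tc = (600, none) := by
          unfold find_true_value
          rw [pvLoopA_false none (some x) tc _ 0
            (fun a _ b hb c _ => by simpa [pvFunc] using hne b hb)]
          decide
        have hB : find_true_value_alt none (some x) tc = (600, none) := by
          show pvScan x 5 (fun i => (1, i, 1)) (PySem.List.pyRange 1 13 1) = (600, none)
          exact pvScan_nomatch x 5 _ _ hne
        rw [hA, hB]
    | none =>
      match tc with
      | some x =>
        by_cases hx : 1 ≤ x ∧ x ≤ 5
        · obtain ⟨h1, h2⟩ := hx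
          interval_cases x <;> rfl
        · have hne : ∀ i ∈ PySem.List.pyRange 1 6 1, (i == x) = false := by
            intro i hi
            rw [PySem.List.mem_pyRange_one] at hi
            simp only [beq_eq_false_iff_ne, ne_eq]
            omega
          have hA : find_true_value none none (some x) = (600, none) := by
            unfold find_true_value
            rw [pvLoopA_false none none (some x) _ 0
              (fun a _ b _ c hc => by simpa [pvFunc] using hne c hc)]
            decide
          have hB : find_true_value_alt none none (some x) = (600, none) := by
            show pvScan x 1 (fun i => (1, 1, i)) (PySem.List.pyRange 1 6 1) = (600, none)
            exact pvScan_nomatch x 1 _ _ hne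
          rw [hA, hB]
      | none => rfl
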